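-- pv_equiv track=rewrite | github.com/tormat20/PadelAppSpecDriven | backend/app/domain/scheduling.py | _apply_court_rotation_optimization
-- ===== SOURCE A (Python) =====
-- def _apply_court_rotation_optimization(
--     schedule: list[list[tuple[tuple[int, int], tuple[int, int]]]],
--     num_courts: int,
-- ) -> list[list[tuple[tuple[int, int], tuple[int, int]]]]:
--     """Minimize consecutive same-court assignments across rounds.
--
--     Rotate each round's match list so that a player who just played on court C
--     is less likely to play on court C again in the next round.  This is a simple
--     greedy pass: for each round after the first, find the rotation that minimises
--     the number of players who repeat their court from the previous round.
--     """
--     if not schedule: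
--         return schedule
--
--     optimized = [schedule[0]]
--     for r in range(1, len(schedule)):
--         prev = optimized[r - 1]
--         curr = schedule[r]
--         if not curr:
--             optimized.append(curr)
--             continue
--
--         # Build player→court map from prev round
--         prev_court: dict[int, int] = {}
--         for court_idx, ((a, b), (c, d)) in enumerate(prev):
--             for p in (a, b, c, d):
--                 prev_court[p] = court_idx
--
--         best_rotation = 0
--         best_penalty = float("inf")
--         n = len(curr)
--         for rotation in range(n):
--             rotated = curr[rotation:] + curr[:rotation]
--             penalty = sum(
--                 1
--                 for court_idx, ((a, b), (c, d)) in enumerate(rotated)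
--                 for p in (a, b, c, d)
--                 if prev_court.get(p) == court_idx
--             )
--             if penalty < best_penalty:
--                 best_penalty = penalty
--                 best_rotation = rotation
--
--         best = curr[best_rotation:] + curr[:best_rotation]
--         optimized.append(best)
--
--     return optimized
-- ===== SOURCE B (Python) =====
-- def _apply_court_rotation_optimization(schedule, num_courts):
--     """One pass per round instead of trying every rotation: rotating curr by k
--     puts match i on court (i - k) % n, so a player whose previous court was c
--     repeats exactly when k == (i - c) % n; tally those keys once and take the
--     first rotation with the smallest tally, carrying the previous optimized
--     round in an accumulator instead of re-indexing the output list."""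
--     def rotate_round(prev, curr):
--         prev_court = dict((p, i)
--                           for i, ((a, b), (c, d)) in enumerate(prev)
--                           for p in (a, b, c, d))
--         n = len(curr)
--         keys = [(i - prev_court[p]) % n
--                 for i, ((a, b), (c, d)) in enumerate(curr)
--                 for p in (a, b, c, d)
--                 if p in prev_court and prev_court[p] < n]
--         tally = {}
--         for k in keys:
--             tally[k] = tally.get(k, 0) + 1
--         best = min(range(n), key=lambda k: tally.get(k, 0))
--         return curr[best:] + curr[:best]
--
--     if not schedule:
--         return schedule
--     out = [schedule[0]]
--     prev = schedule[0]
--     for curr in schedule[1:]: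
--         nxt = rotate_round(prev, curr) if curr else curr
--         out.append(nxt)
--         prev = nxt
--     return out
-- ===== Notes on version B (the rewrite author's own statement) =====
-- stated objective: faster
-- what changed: Instead of trying every rotation and recounting repeats (O(n^2) per round), B makes one pass per round tallying, for each player, the unique rotation (i - prev_court) mod n that would put them back on their previous court, picks the first rotation with the smallest tally, and carries the previous optimized round in an accumulator variable while folding over the rounds themselves instead of re-indexing the output list by an index range.
import Mathlib
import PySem

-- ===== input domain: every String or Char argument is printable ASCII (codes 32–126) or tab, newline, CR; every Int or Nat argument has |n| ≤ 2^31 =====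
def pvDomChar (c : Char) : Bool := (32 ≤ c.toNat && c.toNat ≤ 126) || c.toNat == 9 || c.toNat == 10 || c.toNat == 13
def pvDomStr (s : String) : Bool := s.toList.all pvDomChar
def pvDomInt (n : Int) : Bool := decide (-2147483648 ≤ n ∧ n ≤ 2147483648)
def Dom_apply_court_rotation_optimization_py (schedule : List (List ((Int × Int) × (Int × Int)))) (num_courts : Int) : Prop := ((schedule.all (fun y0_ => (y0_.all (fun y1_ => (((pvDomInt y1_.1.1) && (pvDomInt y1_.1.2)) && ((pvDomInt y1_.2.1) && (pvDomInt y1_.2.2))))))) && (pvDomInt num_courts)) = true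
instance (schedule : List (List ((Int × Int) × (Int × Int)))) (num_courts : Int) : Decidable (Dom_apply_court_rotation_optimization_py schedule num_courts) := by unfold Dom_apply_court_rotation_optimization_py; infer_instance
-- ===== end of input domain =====

-- B replaces A's O(R·n²) try-every-rotation scan by a single O(R·n) tally of (i - prev_court) mod n per player,
-- folding over the rounds with the previous optimized round as an accumulator (objective: faster, asymptotic).

-- ===== PORT A =====
-- the tuple (a, b, c, d) of players the Python destructures from one match
def pvPlayersA (m : (Int × Int) × (Int × Int)) : List Int := [m.1.1, m.1.2, m.2.1, m.2.2]

-- prev_court: player → court index in the previous round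
def pvPrevCourtA (prev : List ((Int × Int) × (Int × Int))) : PySem.Dict Int Int :=
  (PySem.List.enumerate prev 0).foldl
    (fun d it => (pvPlayersA it.2).foldl (fun d p => d.insert p it.1) d)
    PySem.Dict.empty

-- penalty = sum(1 for court_idx, ((a,b),(c,d)) in enumerate(rotated) for p in (a,b,c,d) if prev_court.get(p) == court_idx)
def pvPenaltyA (pc : PySem.Dict Int Int) (rotated : List ((Int × Int) × (Int × Int))) : Int :=
  (PySem.List.enumerate rotated 0).foldl
    (fun acc it => (pvPlayersA it.2).foldl
      (fun s p => s + (if pc.get? p == some it.1 then 1 else 0)) acc)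
    0

-- the body of A's loop over rounds (the nonempty-curr branch)
def pvRoundA (prev curr : List ((Int × Int) × (Int × Int))) : List ((Int × Int) × (Int × Int)) :=
  let pc := pvPrevCourtA prev
  let n : Int := curr.length
  let best := (PySem.List.pyRange 0 n).foldl
    (fun st rotation =>
      let rotated := PySem.List.slice curr (some rotation) none ++ PySem.List.slice curr none (some rotation)
      let penalty := pvPenaltyA pc rotated
      match st.2 with
      | none => (rotation, some penalty)
      | some bp => if penalty < bp then (rotation, some penalty) else st)
    ((0 : Int), (none : Option Int))
  PySem.List.slice curr (some best.1) none ++ PySem.List.slice curr none (some best.1)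

def apply_court_rotation_optimization_py (schedule : List (List ((Int × Int) × (Int × Int)))) (num_courts : Int) : List (List ((Int × Int) × (Int × Int))) :=
  if schedule.isEmpty then schedule
  else
    (PySem.List.pyRange 1 (schedule.length : Int)).foldl
      (fun optimized r =>
        let prev := PySem.List.pyGetD optimized (r - 1) []
        let curr := PySem.List.pyGetD schedule r []
        if curr.isEmpty then optimized ++ [curr]
        else optimized ++ [pvRoundA prev curr])
      [PySem.List.pyGetD schedule 0 []]

-- ===== PORT B =====
def pvPlayersB : (Int × Int) × (Int × Int) → List Int
  | ((a, b), (c, d)) => [a, b, c, d]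

-- prev_court = dict((p, i) for i, match in enumerate(prev) for p in players(match))
def pvPrevCourtB (prev : List ((Int × Int) × (Int × Int))) : PySem.Dict Int Int :=
  ((PySem.List.enumerate prev 0).flatMap
      (fun it => (pvPlayersB it.2).map (fun p => (p, it.1)))).foldl
    (fun d kv => d.insert kv.1 kv.2) PySem.Dict.empty

-- keys = [(i - prev_court[p]) % n for i, match in enumerate(curr) for p in players(match) if p in prev_court and prev_court[p] < n]
def pvKeysB (pc : PySem.Dict Int Int) (n : Int) (curr : List ((Int × Int) × (Int × Int))) : List Int :=
  (PySem.List.enumerate curr 0).flatMap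
    (fun it => (pvPlayersB it.2).filterMap
      (fun p => match pc.get? p with
        | none => none
        | some c0 => if c0 < n then some (PySem.Int.mod (it.1 - c0) n) else none))

-- rotate_round: tally the keys, take the first rotation with the smallest tally
def pvRotateRoundB (prev curr : List ((Int × Int) × (Int × Int))) : List ((Int × Int) × (Int × Int)) :=
  let pc := pvPrevCourtB prev
  let n : Int := curr.length
  let tally := (pvKeysB pc n curr).foldl (fun t k => t.insert k (t.getD k 0 + 1)) (PySem.Dict.empty : PySem.Dict Int Int)
  let best := (PySem.List.min? (PySem.List.pyRange 0 n) (fun k => tally.getD k 0)).getD 0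
  PySem.List.slice curr (some best) none ++ PySem.List.slice curr none (some best)

def apply_court_rotation_optimization_py_alt (schedule : List (List ((Int × Int) × (Int × Int)))) (num_courts : Int) : List (List ((Int × Int) × (Int × Int))) :=
  match schedule with
  | [] => schedule
  | first :: rest =>
      (rest.foldl
        (fun st curr =>
          let nxt := if curr.isEmpty then curr else pvRotateRoundB st.2 curr
          (st.1 ++ [nxt], nxt))
        ([first], first)).1

-- ===== PRECONDITION & SPEC =====
def Spec_apply_court_rotation_optimization_py (schedule : List (List ((Int × Int) × (Int × Int)))) (num_courts : Int) (out : List (List ((Int × Int) × (Int × Int)))) : Prop := out = apply_court_rotation_optimization_py_alt schedule num_courts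
instance (schedule : List (List ((Int × Int) × (Int × Int)))) (num_courts : Int) (out : List (List ((Int × Int) × (Int × Int)))) : Decidable (Spec_apply_court_rotation_optimization_py schedule num_courts out) := by unfold Spec_apply_court_rotation_optimization_py; infer_instance

-- ===== CLAIM (what is proved, stated in full; the proofs are below) =====
def Claim_equal_apply_court_rotation_optimization_py : Prop := ∀ (schedule : List (List ((Int × Int) × (Int × Int)))) (num_courts : Int), Dom_apply_court_rotation_optimization_py schedule num_courts → Spec_apply_court_rotation_optimization_py schedule num_courts (apply_court_rotation_optimization_py schedule num_courts)

-- ===== LEMMAS AND PROOFS =====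

lemma pvPlayersB_eq (m : (Int × Int) × (Int × Int)) : pvPlayersB m = pvPlayersA m := by
  rcases m with ⟨⟨a, b⟩, ⟨c, d⟩⟩; rfl

lemma pvPrevCourtB_eq (prev : List ((Int × Int) × (Int × Int))) :
    pvPrevCourtB prev = pvPrevCourtA prev := by
  unfold pvPrevCourtB pvPrevCourtA
  rw [List.foldl_flatMap]
  simp only [List.foldl_map, pvPlayersB_eq]

-- number of players of match m whose previous court is j
def pvCnt (pc : PySem.Dict Int Int) (j : Int) (m : (Int × Int) × (Int × Int)) : Int :=
  ((pvPlayersA m).countP (fun p => pc.get? p == some j) : Int)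

-- sum of F over enumerate xs s
def pvSumE {α : Type} (F : Int → α → Int) (xs : List α) (s : Int) : Int :=
  ((PySem.List.enumerate xs s).map (fun it => F it.1 it.2)).sum

lemma pvSumE_shift {α : Type} (F : Int → α → Int) (xs : List α) (t : Int) :
    ∀ s, pvSumE F xs (s + t) = pvSumE (fun i m => F (i + t) m) xs s := by
  induction xs with
  | nil => intro s; simp [pvSumE]
  | cons x xs ih =>
    intro s
    simp only [pvSumE, PySem.List.enumerate_cons, List.map_cons, List.sum_cons]
    have h : s + t + 1 = (s + 1) + t := by ring
    rw [h]
    have := ih (s + 1)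
    simp only [pvSumE] at this
    rw [this]

lemma pvSumE_append {α : Type} (F : Int → α → Int) (xs ys : List α) (s : Int) :
    pvSumE F (xs ++ ys) s = pvSumE F xs s + pvSumE F ys (s + xs.length) := by
  simp [pvSumE, PySem.List.enumerate_append]

lemma pvSumE_congr {α : Type} (F G : Int → α → Int) (xs : List α) (s : Int)
    (h : ∀ (k : Nat) (hk : k < xs.length), F (s + k) xs[k] = G (s + k) xs[k]) :
    pvSumE F xs s = pvSumE G xs s := by
  unfold pvSumE
  congr 1
  apply List.map_congr_left
  intro it hit
  rw [PySem.List.mem_enumerate_iff] at hit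
  obtain ⟨k, hk, rfl⟩ := hit
  exact h k hk

lemma pvPenaltyA_eq (pc : PySem.Dict Int Int) (rotated : List ((Int × Int) × (Int × Int))) :
    pvPenaltyA pc rotated = pvSumE (fun j m => pvCnt pc j m) rotated 0 := by
  unfold pvPenaltyA pvSumE
  rw [PySem.List.foldl_congr_mem _ _ (fun acc it => acc + pvCnt pc it.1 it.2)]
  · rw [PySem.List.foldl_add]; simp
  · intro acc it _
    rw [PySem.List.foldl_add]
    unfold pvCnt
    rw [PySem.List.sum_map_ite_one_zero]

-- a % n = r when a = r + n*q and 0 ≤ r < n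
lemma pvEmod_eq (a n r q : Int) (hr0 : 0 ≤ r) (hrn : r < n) (h : a = r + n * q) :
    a % n = r := by
  rw [h, Int.add_mul_emod_self_left, Int.emod_eq_of_lt hr0 hrn]

-- the mod-shift equivalence behind the tally keys
lemma pvModShift (n i k c0 : Int) (hk0 : 0 ≤ k) (hkn : k < n) (hc0 : 0 ≤ c0) (hc0n : c0 < n) :
    ((i - c0) % n = k ↔ c0 = (i - k) % n) := by
  constructor
  · intro h
    have hq := Int.emod_add_mul_ediv (i - c0) n
    have he : i - k = c0 + n * ((i - c0) / n) := by omega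
    rw [he, Int.add_mul_emod_self_left, Int.emod_eq_of_lt hc0 hc0n]
  · intro h
    have hq := Int.emod_add_mul_ediv (i - k) n
    have he : i - c0 = k + n * ((i - k) / n) := by omega
    rw [he, Int.add_mul_emod_self_left, Int.emod_eq_of_lt hk0 hkn]

-- all values stored in prev_court are nonnegative
def pvInv (d : PySem.Dict Int Int) : Prop := ∀ p c0, d.get? p = some c0 → 0 ≤ c0

lemma pvInv_players (ps : List Int) (i : Int) (hi : 0 ≤ i) :
    ∀ d, pvInv d → pvInv (ps.foldl (fun d p => d.insert p i) d) := by
  induction ps with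
  | nil => intro d hd; exact hd
  | cons q ps ih =>
    intro d hd
    simp only [List.foldl_cons]
    apply ih
    intro p c0 h
    rw [PySem.Dict.get?_insert] at h
    split at h
    · exact (Option.some_inj.mp h) ▸ hi
    · exact hd p c0 h

lemma pvInv_prevCourt_aux (xs : List ((Int × Int) × (Int × Int))) :
    ∀ (s : Int), 0 ≤ s → ∀ d, pvInv d →
      pvInv ((PySem.List.enumerate xs s).foldl
        (fun d it => (pvPlayersA it.2).foldl (fun d p => d.insert p it.1) d) d) := by
  induction xs with
  | nil => intro s _ d hd; simpa [PySem.List.enumerate_nil] using hd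
  | cons x xs ih =>
    intro s hs d hd
    simp only [PySem.List.enumerate_cons, List.foldl_cons]
    exact ih (s + 1) (by omega) _ (pvInv_players _ s hs d hd)

lemma pvInv_prevCourt (prev : List ((Int × Int) × (Int × Int))) : pvInv (pvPrevCourtA prev) := by
  apply pvInv_prevCourt_aux prev 0 le_rfl
  intro p c0 h
  rw [PySem.Dict.get?_empty] at h
  exact absurd h (by simp)

-- per-match chunk of keys counted at k equals pvCnt at (i - k) mod n
lemma pvChunk_count (pc : PySem.Dict Int Int) (hinv : pvInv pc) (n i k : Int)
    (hn : 0 < n) (hk0 : 0 ≤ k) (hkn : k < n) (m : (Int × Int) × (Int × Int)) :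
    (((pvPlayersB m).filterMap
      (fun p => match pc.get? p with
        | none => none
        | some c0 => if c0 < n then some (PySem.Int.mod (i - c0) n) else none)).count k : Int)
      = pvCnt pc (PySem.Int.mod (i - k) n) m := by
  rw [List.count_filterMap]
  unfold pvCnt
  rw [pvPlayersB_eq]
  congr 1
  apply List.countP_congr
  intro p _
  cases h : pc.get? p with
  | none => simp
  | some c0 =>
    have hc0 : 0 ≤ c0 := hinv p c0 h
    rw [PySem.Int.mod_eq_emod_of_pos hn]
    by_cases hlt : c0 < n
    · simp only [if_pos hlt, PySem.Int.mod_eq_emod_of_pos hn]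
      have hiff := pvModShift n i k c0 hk0 hkn hc0 hlt
      simp [hiff]
    · simp only [if_neg hlt]
      have hb := Int.emod_lt_of_pos (i - k) hn
      have : ¬ (c0 = (i - k) % n) := by omega
      simp [this]

lemma pvKeys_count_aux (pc : PySem.Dict Int Int) (hinv : pvInv pc) (n k : Int)
    (hn : 0 < n) (hk0 : 0 ≤ k) (hkn : k < n) (xs : List ((Int × Int) × (Int × Int))) :
    ∀ s, (((PySem.List.enumerate xs s).flatMap
      (fun it => (pvPlayersB it.2).filterMap
        (fun p => match pc.get? p with
          | none => none
          | some c0 => if c0 < n then some (PySem.Int.mod (it.1 - c0) n) else none))).count k : Int)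
      = pvSumE (fun i m => pvCnt pc (PySem.Int.mod (i - k) n) m) xs s := by
  induction xs with
  | nil => intro s; simp [pvSumE]
  | cons x xs ih =>
    intro s
    simp only [PySem.List.enumerate_cons, List.flatMap_cons, List.count_append]
    have hsum : pvSumE (fun i m => pvCnt pc (PySem.Int.mod (i - k) n) m) (x :: xs) s
        = pvCnt pc (PySem.Int.mod (s - k) n) x
          + pvSumE (fun i m => pvCnt pc (PySem.Int.mod (i - k) n) m) xs (s + 1) := by
      simp [pvSumE, PySem.List.enumerate_cons]
    rw [hsum, ← ih (s + 1), ← pvChunk_count pc hinv n s k hn hk0 hkn x]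
    push_cast
    ring

-- penalty of the rotation by k equals the number of tally keys equal to k
lemma pvPenalty_eq_count (prev curr : List ((Int × Int) × (Int × Int))) (k : Int)
    (hk0 : 0 ≤ k) (hkn : k < (curr.length : Int)) :
    pvPenaltyA (pvPrevCourtA prev)
        (PySem.List.slice curr (some k) none ++ PySem.List.slice curr none (some k))
      = ((pvKeysB (pvPrevCourtB prev) (curr.length : Int) curr).count k : Int) := by
  have hn : 0 < (curr.length : Int) := lt_of_le_of_lt hk0 hkn
  have hinv : pvInv (pvPrevCourtA prev) := pvInv_prevCourt prev
  have hkn' : k.toNat ≤ curr.length := by omega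
  rw [PySem.List.slice_from curr hk0, PySem.List.slice_to curr hk0]
  rw [pvPenaltyA_eq, pvSumE_append]
  unfold pvKeysB
  rw [pvPrevCourtB_eq, pvKeys_count_aux (pvPrevCourtA prev) hinv (curr.length : Int) k hn hk0 hkn curr 0]
  have hlen_take : ((curr.take k.toNat).length : Int) = k := by
    simp [List.length_take]
    omega
  have hlen_drop : ((curr.drop k.toNat).length : Int) = (curr.length : Int) - k := by
    simp [List.length_drop]
    omega
  have hsplit : ∀ (G : Int → ((Int × Int) × (Int × Int)) → Int),
      pvSumE G curr 0 = pvSumE G (curr.take k.toNat) 0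
        + pvSumE G (curr.drop k.toNat) (0 + ((curr.take k.toNat).length : Int)) := by
    intro G
    conv_lhs => rw [show curr = curr.take k.toNat ++ curr.drop k.toNat from (List.take_append_drop _ _).symm]
    exact pvSumE_append G _ _ 0
  rw [hsplit]
  have hdrop : pvSumE (fun i m => pvCnt (pvPrevCourtA prev) (PySem.Int.mod (i - k) (curr.length : Int)) m)
        (curr.drop k.toNat) (0 + ((curr.take k.toNat).length : Int))
      = pvSumE (fun j m => pvCnt (pvPrevCourtA prev) j m) (curr.drop k.toNat) 0 := by
    rw [hlen_take, pvSumE_shift]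
    apply pvSumE_congr
    intro j hj
    have hjn : (j : Int) < (curr.length : Int) - k := by
      have h2 : j < (curr.drop k.toNat).length := hj
      simp [List.length_drop] at h2
      omega
    have hm : PySem.Int.mod ((0 : Int) + j + k - k) (curr.length : Int) = (0 : Int) + j := by
      rw [PySem.Int.mod_eq_emod_of_pos hn]
      exact pvEmod_eq _ _ _ 0 (by omega) (by omega) (by ring)
    rw [hm]
  have htake : pvSumE (fun i m => pvCnt (pvPrevCourtA prev) (PySem.Int.mod (i - k) (curr.length : Int)) m)
        (curr.take k.toNat) 0
      = pvSumE (fun j m => pvCnt (pvPrevCourtA prev) j m) (curr.take k.toNat)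
          (0 + ((curr.drop k.toNat).length : Int)) := by
    rw [hlen_drop, pvSumE_shift]
    apply pvSumE_congr
    intro j hj
    have hjk : (j : Int) < k := by
      have h2 : j < (curr.take k.toNat).length := hj
      simp [List.length_take] at h2
      omega
    have hm : PySem.Int.mod ((0 : Int) + j - k) (curr.length : Int)
        = (0 : Int) + j + ((curr.length : Int) - k) := by
      rw [PySem.Int.mod_eq_emod_of_pos hn]
      exact pvEmod_eq _ _ _ (-1) (by omega) (by omega) (by ring)
    rw [hm]
  rw [hdrop, htake]
  ring

-- min(m :: x :: t, key=f) steps to the smaller of its two heads (first wins ties)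
lemma pvMin_cons_cons (f : Int → Int) (m x : Int) (t : List Int) :
    PySem.List.min? (m :: x :: t) f
      = if f x < f m then PySem.List.min? (x :: t) f else PySem.List.min? (m :: t) f := by
  by_cases h : f x < f m
  · rw [if_pos h]; show List.foldl _ (if f x < f m then some x else some m) t = _; rw [if_pos h]; rfl
  · rw [if_neg h]; show List.foldl _ (if f x < f m then some x else some m) t = _; rw [if_neg h]; rfl

-- A's running best-(rotation, penalty) scan computes min(xs, key=f)
lemma pvScan_aux (f : Int → Int) (g : Int × Option Int → Int → Int × Option Int)
    (hg : ∀ b bp rot, g (b, some bp) rot = if f rot < bp then (rot, some (f rot)) else (b, some bp))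
    (xs : List Int) : ∀ m : Int,
    xs.foldl g (m, some (f m)) = (((PySem.List.min? (m :: xs) f).getD 0),
      some (f ((PySem.List.min? (m :: xs) f).getD 0))) := by
  induction xs with
  | nil => intro m; rfl
  | cons x t ih =>
    intro m
    rw [List.foldl_cons, hg m (f m) x, pvMin_cons_cons]
    by_cases h : f x < f m
    · rw [if_pos h, if_pos h]; exact ih x
    · rw [if_neg h, if_neg h]; exact ih m

lemma pvScan_eq_min (f : Int → Int) (g : Int × Option Int → Int → Int × Option Int)
    (hg0 : ∀ b rot, g (b, none) rot = (rot, some (f rot)))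
    (hg : ∀ b bp rot, g (b, some bp) rot = if f rot < bp then (rot, some (f rot)) else (b, some bp))
    (xs : List Int) (h : xs ≠ []) :
    (xs.foldl g ((0 : Int), (none : Option Int))).1 = (PySem.List.min? xs f).getD 0 := by
  cases xs with
  | nil => exact absurd rfl h
  | cons x t => rw [List.foldl_cons, hg0 0 x, pvScan_aux f g hg t x]

lemma pvMin_congr_aux (f g : Int → Int) : ∀ (t : List Int) (m : Int),
    (∀ x ∈ t, f x = g x) → f m = g m →
    PySem.List.min? (m :: t) f = PySem.List.min? (m :: t) g := by
  intro t
  induction t with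
  | nil => intro m _ _; rfl
  | cons x t ih =>
    intro m h hm
    have hx : f x = g x := h x (by simp)
    rw [pvMin_cons_cons, pvMin_cons_cons, hx, hm]
    by_cases hc : g x < g m
    · rw [if_pos hc, if_pos hc]
      exact ih x (fun y hy => h y (by simp [hy])) hx
    · rw [if_neg hc, if_neg hc]
      exact ih m (fun y hy => h y (by simp [hy])) hm

lemma pvMin_congr (f g : Int → Int) (xs : List Int) (h : ∀ x ∈ xs, f x = g x) :
    PySem.List.min? xs f = PySem.List.min? xs g := by
  cases xs with
  | nil => rfl
  | cons x t => exact pvMin_congr_aux f g t x (fun y hy => h y (by simp [hy])) (h x (by simp))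

lemma pvRound_eq (prev curr : List ((Int × Int) × (Int × Int))) (h : curr ≠ []) :
    pvRoundA prev curr = pvRotateRoundB prev curr := by
  have hn : 0 < (curr.length : Int) := by
    have : curr.length ≠ 0 := fun hc => h (List.length_eq_zero_iff.mp hc)
    omega
  have hne : PySem.List.pyRange 0 (curr.length : Int) ≠ [] := by
    intro hnil
    have h0 : (0 : Int) ∈ PySem.List.pyRange 0 (curr.length : Int) :=
      PySem.List.mem_pyRange_one.mpr ⟨le_rfl, hn⟩
    rw [hnil] at h0
    exact absurd h0 (List.not_mem_nil)
  simp only [pvRoundA, pvRotateRoundB]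
  rw [pvScan_eq_min
      (fun rotation => pvPenaltyA (pvPrevCourtA prev)
        (PySem.List.slice curr (some rotation) none ++ PySem.List.slice curr none (some rotation)))
      _ (fun _ _ => rfl) (fun _ _ _ => rfl) _ hne]
  rw [pvMin_congr
      (fun rotation => pvPenaltyA (pvPrevCourtA prev)
        (PySem.List.slice curr (some rotation) none ++ PySem.List.slice curr none (some rotation)))
      (fun k => ((pvKeysB (pvPrevCourtB prev) (curr.length : Int) curr).foldl
        (fun t k => t.insert k (t.getD k 0 + 1)) (PySem.Dict.empty : PySem.Dict Int Int)).getD k 0)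
      (PySem.List.pyRange 0 (curr.length : Int)) ?_]
  intro x hx
  rw [PySem.List.mem_pyRange_one] at hx
  beta_reduce
  rw [pvPenalty_eq_count prev curr x hx.1 hx.2,
    PySem.Dict.getD_foldl_insert_add_one, PySem.Dict.getD_empty]
  omega

-- A's index-range fold with pyGetD re-indexing equals B's accumulator fold over the tail
lemma pv_outer_eq :
    ∀ (rest acc : List (List ((Int × Int) × (Int × Int)))) (prev : List ((Int × Int) × (Int × Int)))
      (schedule : List (List ((Int × Int) × (Int × Int)))),
      acc ≠ [] →
      schedule.drop acc.length = rest →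
      PySem.List.pyGetD acc ((acc.length : Int) - 1) [] = prev →
      (PySem.List.pyRange (acc.length : Int) (schedule.length : Int)).foldl
        (fun optimized r =>
          let p := PySem.List.pyGetD optimized (r - 1) []
          let curr := PySem.List.pyGetD schedule r []
          if curr.isEmpty then optimized ++ [curr]
          else optimized ++ [pvRoundA p curr])
        acc
      = (rest.foldl
          (fun st curr =>
            let nxt := if curr.isEmpty then curr else pvRotateRoundB st.2 curr
            (st.1 ++ [nxt], nxt))
          (acc, prev)).1 := by
  intro rest
  induction rest with
  | nil =>
    intro acc prev schedule hacc hdrop hlast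
    have hlen : schedule.length ≤ acc.length := by
      by_contra hlt
      have := List.drop_eq_nil_iff.mp hdrop
      omega
    rw [PySem.List.pyRange_one_eq_nil (by exact_mod_cast hlen)]
    rfl
  | cons curr rest' ih =>
    intro acc prev schedule hacc hdrop hlast
    have hlt : acc.length < schedule.length := by
      by_contra hge
      rw [List.drop_eq_nil_iff.mpr (by omega)] at hdrop
      exact absurd hdrop (by simp)
    have hcurr : PySem.List.pyGetD schedule (acc.length : Int) [] = curr := by
      rw [PySem.List.pyGetD_natCast]
      have hget : schedule.drop acc.length = curr :: rest' := hdrop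
      have : schedule[acc.length]? = some curr := by
        have h := congrArg (fun l => l[0]?) hget
        simpa [List.getElem?_drop] using h
      simp [List.getD, this]
    rw [PySem.List.pyRange_one_cons (by exact_mod_cast hlt)]
    rw [List.foldl_cons]
    simp only
    rw [show (acc.length : Int) - 1 = (acc.length : Int) - 1 from rfl, hlast, hcurr]
    set nxt := if curr.isEmpty then curr else pvRoundA prev curr with hnxt
    have hnxtB : nxt = if curr.isEmpty then curr else pvRotateRoundB prev curr := by
      by_cases hc : curr.isEmpty
      · simp [hnxt, hc]
      · have hne : curr ≠ [] := by
          intro hh; rw [hh] at hc; exact hc rfl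
        simp [hnxt, hc, pvRound_eq prev curr hne]
    have hstep : (if curr.isEmpty then acc ++ [curr] else acc ++ [pvRoundA prev curr]) = acc ++ [nxt] := by
      by_cases hc : curr.isEmpty <;> simp [hnxt, hc]
    rw [hstep]
    have hlen' : (acc ++ [nxt]).length = acc.length + 1 := by simp
    have h1 : ((acc ++ [nxt]).length : Int) = (acc.length : Int) + 1 := by
      rw [hlen']; push_cast; ring
    have := ih (acc ++ [nxt]) nxt schedule (by simp)
      (by rw [hlen']; rw [← List.drop_drop]; rw [hdrop]; rfl)
      (by
        rw [h1]
        have h2 : PySem.List.pyGetD (acc ++ [nxt]) (acc.length : Int) [] = (acc ++ [nxt]).getD acc.length [] :=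
          PySem.List.pyGetD_natCast (acc ++ [nxt]) acc.length []
        simp only [show (acc.length : Int) + 1 - 1 = (acc.length : Int) by ring, h2]
        simp)
    rw [h1] at this
    rw [this]
    rw [List.foldl_cons]
    simp only [← hnxtB]

theorem pv_top_eq (schedule : List (List ((Int × Int) × (Int × Int)))) (num_courts : Int) :
    apply_court_rotation_optimization_py schedule num_courts
      = apply_court_rotation_optimization_py_alt schedule num_courts := by
  unfold apply_court_rotation_optimization_py apply_court_rotation_optimization_py_alt
  cases schedule with
  | nil => rfl
  | cons first rest =>
    simp only [List.isEmpty_cons, if_neg (by simp : ¬ (false = true))]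
    have h0 : PySem.List.pyGetD (first :: rest) (0 : Int) [] = first := by
      simp [PySem.List.pyGetD_zero_cons]
    rw [h0]
    have := pv_outer_eq rest [first] first (first :: rest) (by simp) (by simp)
      (by simp [PySem.List.pyGetD_zero_cons])
    simpa using this

-- ===== VERDICT (by name: the statement is the Claim_ definition above) =====
theorem apply_court_rotation_optimization_py_spec : Claim_equal_apply_court_rotation_optimization_py := by
  intro schedule num_courts _
  unfold Spec_apply_court_rotation_optimization_py
  exact pv_top_eq schedule num_courts
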